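-- pv_equiv track=rewrite | github.com/jmorenov/CRIP | cifrado_flujo.py | nlfsr
-- ===== SOURCE A (Python) =====
-- def nlfsr(f, s, k):
--     """ Implementación de un NLFSR.
--
--         Parámetros:
--         f -- Función de feed-back definida como un array de arrays binario: [[1,0,1],[1,1,1],[0,1,1]]
--         s -- Semilla para el primer estado.
--         k -- Longitud de la secuencia.
--
--         Devuelve: Una lista binaria con la secuencia.
--
--     """
--     result = []
--     c = s[:]
--
--     for i in range(k):
--         b = 0
--         for j in range(len(f)):
--             a = 1
--             for t in range(len(f[j])):
--                 if f[j][t] == 1: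
--                     a *= c[t]
--             b ^= a
--         result.append(c[0])
--         for x in range(len(c)-1):
--             c[x] = c[x+1]
--         c[-1] = b
--
--     return result
-- ===== SOURCE B (Python) =====
-- def nlfsr(f, s, k):
--     """Same NLFSR, but the register is a growing sequence: each feedback bit is
--     computed from the window seq[i:i+len(s)] and appended, no in-place shifting;
--     the answer is the first k elements of the sequence."""
--     seq = list(s)
--     for i in range(k):
--         b = 0
--         for row in f:
--             a = 1
--             for t, bit in enumerate(row):
--                 if bit == 1:
--                     a *= seq[i + t]
--             b ^= a
--         seq.append(b)
--     return seq[:max(k, 0)]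
-- ===== Notes on version B (the rewrite author's own statement) =====
-- stated objective: alternative
-- what changed: The mutable fixed-width register with an in-place shift loop is replaced by a growing output sequence: each feedback bit is computed from the window seq[i:i+n] by index offset and appended, and the result is the slice seq[:k] instead of a separately accumulated list.
import Mathlib
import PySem

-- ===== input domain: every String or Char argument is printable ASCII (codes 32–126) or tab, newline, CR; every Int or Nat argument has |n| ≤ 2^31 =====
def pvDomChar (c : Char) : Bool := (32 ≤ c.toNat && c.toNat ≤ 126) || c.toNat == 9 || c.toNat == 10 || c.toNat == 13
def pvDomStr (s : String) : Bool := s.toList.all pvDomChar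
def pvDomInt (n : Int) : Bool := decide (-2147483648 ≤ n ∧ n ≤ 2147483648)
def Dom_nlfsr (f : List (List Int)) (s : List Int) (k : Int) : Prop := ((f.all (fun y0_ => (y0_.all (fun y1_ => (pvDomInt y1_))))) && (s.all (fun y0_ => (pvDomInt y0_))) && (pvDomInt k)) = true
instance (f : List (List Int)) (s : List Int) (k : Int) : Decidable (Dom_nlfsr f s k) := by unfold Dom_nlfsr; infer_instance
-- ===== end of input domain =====

-- B replaces the in-place shifted fixed-width register by a growing sequence indexed by offset (same cost, different data structure).


-- ===== PORT A =====
-- feedback bit: for j in range(len(f)): a = 1; for t in range(len(f[j])): if f[j][t]==1: a *= c[t]; b ^= a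
-- (indexing is total via getD; Pre_nlfsr keeps every index in range, so the default is never reached there)
def nlfsrFeedback (f : List (List Int)) (c : List Int) : Int :=
  (List.range f.length).foldl (fun b j =>
    PySem.Int.bxor b ((List.range (f.getD j []).length).foldl
      (fun a t => if (f.getD j []).getD t 0 = 1 then a * c.getD t 0 else a) 1)) 0

-- the for-i loop: append c[0], then shift (for x: c[x]=c[x+1]; c[-1]=b)
def nlfsrGo (f : List (List Int)) : Nat → List Int → List Int → List Int
  | 0, _c, result => result
  | m + 1, c, result =>
      nlfsrGo f m (c.drop 1 ++ [nlfsrFeedback f c]) (result ++ [c.getD 0 0])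

def nlfsr (f : List (List Int)) (s : List Int) (k : Int) : List Int :=
  nlfsrGo f k.toNat s []

-- ===== PORT B =====
-- feedback bit from the window of the growing sequence starting at i (for t, bit in enumerate(row): …)
def nlfsrAltStep (f : List (List Int)) (seq : List Int) (i : Nat) : Int :=
  f.foldl (fun b row =>
    PySem.Int.bxor b ((PySem.List.enumerate row 0).foldl
      (fun a tb => if tb.2 = 1 then a * seq.getD (i + tb.1.toNat) 0 else a) 1)) 0

def nlfsr_alt (f : List (List Int)) (s : List Int) (k : Int) : List Int :=
  let seq := (List.range k.toNat).foldl (fun seq i => seq ++ [nlfsrAltStep f seq i]) s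
  seq.take k.toNat

-- ===== PRECONDITION & SPEC =====
-- Pre_ excludes exactly the inputs where A raises IndexError: k > 0 with an empty seed,
-- or k > 0 with a 1-tap whose index reaches beyond the register.
def Pre_nlfsr (f : List (List Int)) (s : List Int) (k : Int) : Prop :=
  0 < k → (s ≠ [] ∧ ∀ row ∈ f, ∀ t < row.length, row.getD t 0 = 1 → t < s.length)
instance (f : List (List Int)) (s : List Int) (k : Int) : Decidable (Pre_nlfsr f s k) := by
  unfold Pre_nlfsr; infer_instance

def pvWitness_nlfsr : List (List Int) × List Int × Int :=
  ([[1, 0, 1], [1, 1, 1], [0, 1, 1]], [1, 0, 1], 7)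

def Spec_nlfsr (f : List (List Int)) (s : List Int) (k : Int) (out : List Int) : Prop := out = nlfsr_alt f s k
instance (f : List (List Int)) (s : List Int) (k : Int) (out : List Int) : Decidable (Spec_nlfsr f s k out) := by unfold Spec_nlfsr; infer_instance

-- ===== CLAIM (what is proved, stated in full; the proofs are below) =====
def Claim_equal_nlfsr : Prop := ∀ (f : List (List Int)) (s : List Int) (k : Int), Dom_nlfsr f s k → Pre_nlfsr f s k → Spec_nlfsr f s k (nlfsr f s k)

-- ===== LEMMAS AND PROOFS =====

-- B's growing sequence after i appends, in structural form
def seqB (f : List (List Int)) (s : List Int) : Nat → List Int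
  | 0 => s
  | i + 1 => seqB f s i ++ [nlfsrAltStep f (seqB f s i) i]

lemma foldl_eq_seqB (f : List (List Int)) (s : List Int) (m : Nat) :
    (List.range m).foldl (fun seq i => seq ++ [nlfsrAltStep f seq i]) s = seqB f s m := by
  induction m with
  | zero => rfl
  | succ m ih => rw [List.range_succ, List.foldl_append, ih]; rfl

lemma length_seqB (f : List (List Int)) (s : List Int) (i : Nat) :
    (seqB f s i).length = s.length + i := by
  induction i with
  | zero => rfl
  | succ i ih => simp [seqB, ih]; omega

lemma seqB_prefix (f : List (List Int)) (s : List Int) (i j : Nat) (h : i ≤ j) :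
    seqB f s i <+: seqB f s j := by
  induction j with
  | zero => simp_all
  | succ j ih =>
    rcases Nat.lt_or_ge i (j + 1) with h' | h'
    · exact (ih (by omega)).trans ⟨[nlfsrAltStep f (seqB f s j) j], rfl⟩
    · have : i = j + 1 := by omega
      subst this; exact List.prefix_refl _

lemma getD_of_prefix {l₁ l₂ : List Int} (h : l₁ <+: l₂) {n : Nat} (hn : n < l₁.length) :
    l₂.getD n 0 = l₁.getD n 0 := by
  obtain ⟨t, rfl⟩ := h
  simp [List.getD_eq_getElem?_getD, List.getElem?_append_left hn]

lemma getD_drop (seq : List Int) (i t : Nat) :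
    (seq.drop i).getD t 0 = seq.getD (i + t) 0 := by
  simp [List.getD_eq_getElem?_getD, List.getElem?_drop]

-- fold over range-with-getD equals fold over the list itself
lemma foldl_range_getD {α β : Type} (l : List α) (d : α) (g : β → α → β) (init : β) :
    (List.range l.length).foldl (fun b j => g b (l.getD j d)) init = l.foldl g init := by
  induction l generalizing init with
  | nil => rfl
  | cons x xs ih =>
    simp only [List.length_cons, List.range_succ_eq_map, List.foldl_cons, List.foldl_map,
      List.getD_cons_zero, Nat.succ_eq_add_one, List.getD_cons_succ]
    exact ih (g init x)

-- the inner tap-product over enumerate equals the range/getD form, at window offset i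
lemma inner_eq (seq : List Int) (i : Nat) (row : List Int) : ∀ (st : Nat) (init : Int),
    (PySem.List.enumerate row (st : Int)).foldl
      (fun a tb => if tb.2 = 1 then a * seq.getD (i + tb.1.toNat) 0 else a) init
    = (List.range row.length).foldl
      (fun a t => if row.getD t 0 = 1 then a * seq.getD (i + (st + t)) 0 else a) init := by
  induction row with
  | nil => intro st init; rfl
  | cons x xs ih =>
    intro st init
    rw [PySem.List.enumerate_cons, List.foldl_cons]
    have h1 : ((st : Int) + 1) = ((st + 1 : Nat) : Int) := by push_cast; ring
    rw [h1, ih (st + 1)]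
    rw [List.length_cons, List.range_succ_eq_map, List.foldl_cons]
    simp only [List.foldl_map, Nat.succ_eq_add_one, List.getD_cons_succ, List.getD_cons_zero,
      Int.toNat_natCast, Nat.add_zero]
    apply PySem.List.foldl_congr_mem
    intro acc t _
    have h2 : st + 1 + t = st + (t + 1) := by omega
    rw [h2]

lemma feedback_eq (f : List (List Int)) (seq : List Int) (i : Nat) :
    nlfsrFeedback f (seq.drop i) = nlfsrAltStep f seq i := by
  unfold nlfsrFeedback nlfsrAltStep
  rw [foldl_range_getD f []
    (fun b row => PySem.Int.bxor b ((List.range row.length).foldl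
      (fun a t => if row.getD t 0 = 1 then a * (seq.drop i).getD t 0 else a) 1)) 0]
  apply PySem.List.foldl_congr_mem
  intro b row _
  congr 1
  have h := inner_eq seq i row 0 1
  norm_num at h
  simp only [List.getD_eq_getElem?_getD]
  rw [h]
  apply PySem.List.foldl_congr_mem
  intro a t _
  rw [List.getElem?_drop]

-- main invariant: running A's loop on the window (seqB i).drop i yields the slice of B's sequence
lemma go_eq (f : List (List Int)) (s : List Int) (hs : s ≠ []) :
    ∀ (m i : Nat) (res : List Int),
      nlfsrGo f m ((seqB f s i).drop i) res = res ++ ((seqB f s (i + m)).drop i).take m := by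
  intro m
  induction m with
  | zero => intro i res; simp [nlfsrGo]
  | succ m ih =>
    intro i res
    have hlen : (seqB f s i).length = s.length + i := length_seqB f s i
    have hn : 0 < s.length := List.length_pos_iff.mpr hs
    have hi : i < (seqB f s i).length := by omega
    rw [nlfsrGo]
    have hb : nlfsrFeedback f ((seqB f s i).drop i) = nlfsrAltStep f (seqB f s i) i :=
      feedback_eq f (seqB f s i) i
    have hc : ((seqB f s i).drop i).drop 1 ++ [nlfsrFeedback f ((seqB f s i).drop i)]
        = (seqB f s (i + 1)).drop (i + 1) := by
      rw [hb, List.drop_drop]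
      show _ = (seqB f s i ++ [nlfsrAltStep f (seqB f s i) i]).drop (i + 1)
      rw [List.drop_append_of_le_length (by omega)]
    have hx : ((seqB f s i).drop i).getD 0 0 = (seqB f s (i + m + 1)).getD i 0 := by
      rw [getD_drop]
      exact (getD_of_prefix (seqB_prefix f s i (i + m + 1) (by omega)) (by omega)).symm
    rw [hc, hx, ih (i + 1) (res ++ [(seqB f s (i + m + 1)).getD i 0])]
    have hN : i + 1 + m = i + m + 1 := by omega
    have hN2 : i + (m + 1) = i + m + 1 := by omega
    rw [hN, hN2, List.append_assoc]
    congr 1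
    have hiN : i < (seqB f s (i + m + 1)).length := by rw [length_seqB]; omega
    rw [List.drop_eq_getElem_cons hiN, List.take_succ_cons]
    simp [List.getD_eq_getElem?_getD, List.getElem?_eq_getElem hiN]

-- ===== VERDICT (by name: the statement is the Claim_ definition above) =====
theorem nlfsr_spec : Claim_equal_nlfsr := by
  intro f s k _ hpre
  unfold Spec_nlfsr nlfsr nlfsr_alt
  rw [foldl_eq_seqB]
  rcases Nat.eq_zero_or_pos k.toNat with h0 | hpos
  · simp [h0, nlfsrGo, seqB]
  · have hk : 0 < k := by omega
    obtain ⟨hs, _⟩ := hpre hk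
    have := go_eq f s hs k.toNat 0 []
    simpa [seqB] using this
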